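-- pv_equiv track=rewrite | github.com/crerwin/advent | advent/advent2017/day2.py | checksum_row
-- ===== SOURCE A (Python) =====
-- def checksum_row(row):
--     if len(row) == 0:
--         return 0
--     min = row[0]
--     max = row[0]
--     for n in row:
--         if n < min:
--             min = n
--         if n > max:
--             max = n
--     return max - min
-- ===== SOURCE B (Python) =====
-- def checksum_row(row):
--     s = sorted(row)
--     if len(s) == 0:
--         return 0
--     return s[-1] - s[0]
-- ===== Notes on version B (the rewrite author's own statement) =====
-- stated objective: alternative
-- what changed: Replaces the single-pass running min/max tracking loop with a sort-based algorithm: sort the row, then return last element minus first element.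
import Mathlib
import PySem

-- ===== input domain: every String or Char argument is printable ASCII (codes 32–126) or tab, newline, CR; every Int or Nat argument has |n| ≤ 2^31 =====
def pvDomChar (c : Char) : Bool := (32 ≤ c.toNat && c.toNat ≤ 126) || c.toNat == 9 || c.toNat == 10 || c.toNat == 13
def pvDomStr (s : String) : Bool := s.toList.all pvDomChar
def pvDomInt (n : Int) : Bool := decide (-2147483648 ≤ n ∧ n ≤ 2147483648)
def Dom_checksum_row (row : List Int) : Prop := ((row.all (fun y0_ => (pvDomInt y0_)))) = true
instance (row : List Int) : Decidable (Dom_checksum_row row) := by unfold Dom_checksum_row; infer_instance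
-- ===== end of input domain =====

-- B: sort-based alternative (sorted row, last minus first) instead of A's single-pass running min/max loop; not claimed faster.

-- ===== PORT A =====
-- literal port of A: one pass tracking running min and max in a pair accumulator
def checksum_row (row : List Int) : Int :=
  match row with
  | [] => 0
  | h :: _ =>
    let p := row.foldl (fun (p : Int × Int) n =>
      (if n < p.1 then n else p.1, if n > p.2 then n else p.2)) (h, h)
    p.2 - p.1

-- ===== PORT B =====
-- port of B: sort the row, then s[-1] - s[0] (empty guard on the sorted list)
def checksum_row_alt (row : List Int) : Int :=
  if (PySem.List.sorted row (fun y => y) false).length = 0 then 0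
  else PySem.List.pyGetD (PySem.List.sorted row (fun y => y) false) (-1) 0
       - PySem.List.pyGetD (PySem.List.sorted row (fun y => y) false) 0 0

-- ===== PRECONDITION & SPEC =====
def Spec_checksum_row (row : List Int) (out : Int) : Prop := out = checksum_row_alt row
instance (row : List Int) (out : Int) : Decidable (Spec_checksum_row row out) := by unfold Spec_checksum_row; infer_instance

-- ===== CLAIM =====
def Claim_equal_checksum_row : Prop := ∀ (row : List Int), Dom_checksum_row row → Spec_checksum_row row (checksum_row row)

-- ===== LEMMAS AND PROOFS =====
lemma pair_fold_minmax (xs : List Int) (a b : Int) :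
    xs.foldl (fun (p : Int × Int) n =>
      (if n < p.1 then n else p.1, if n > p.2 then n else p.2)) (a, b)
      = (xs.foldl min a, xs.foldl max b) := by
  induction xs generalizing a b with
  | nil => rfl
  | cons x t ih =>
    simp only [List.foldl_cons, ih]
    have hmin : (if x < a then x else a) = min a x := by
      rw [min_def]; split_ifs <;> omega
    have hmax : (if x > b then x else b) = max b x := by
      rw [max_def]; split_ifs <;> omega
    rw [hmin, hmax]

lemma foldl_min_mem (t : List Int) (a : Int) : t.foldl min a ∈ a :: t := by
  induction t generalizing a with
  | nil => simp
  | cons x u ih =>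
    simp only [List.foldl_cons]
    rcases List.mem_cons.mp (ih (min a x)) with h1 | h1
    · rcases min_choice a x with hc | hc
      · rw [h1, hc]; exact List.mem_cons_self
      · rw [h1, hc]; exact List.mem_cons_of_mem _ List.mem_cons_self
    · exact List.mem_cons_of_mem _ (List.mem_cons_of_mem _ h1)

lemma foldl_min_le (t : List Int) (a : Int) : ∀ y ∈ a :: t, t.foldl min a ≤ y := by
  induction t generalizing a with
  | nil => intro y hy; simp at hy; subst hy; simp
  | cons x u ih =>
    intro y hy
    simp only [List.foldl_cons]
    have hbase : u.foldl min (min a x) ≤ min a x := ih (min a x) _ List.mem_cons_self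
    rcases List.mem_cons.mp hy with rfl | h1
    · exact le_trans hbase (min_le_left y x)
    · rcases List.mem_cons.mp h1 with rfl | h2
      · exact le_trans hbase (min_le_right a y)
      · exact ih (min a x) y (List.mem_cons_of_mem _ h2)

lemma foldl_max_mem (t : List Int) (a : Int) : t.foldl max a ∈ a :: t := by
  induction t generalizing a with
  | nil => simp
  | cons x u ih =>
    simp only [List.foldl_cons]
    rcases List.mem_cons.mp (ih (max a x)) with h1 | h1
    · rcases max_choice a x with hc | hc
      · rw [h1, hc]; exact List.mem_cons_self
      · rw [h1, hc]; exact List.mem_cons_of_mem _ List.mem_cons_self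
    · exact List.mem_cons_of_mem _ (List.mem_cons_of_mem _ h1)

lemma le_foldl_max' (t : List Int) (a : Int) : ∀ y ∈ a :: t, y ≤ t.foldl max a := by
  induction t generalizing a with
  | nil => intro y hy; simp at hy; subst hy; simp
  | cons x u ih =>
    intro y hy
    simp only [List.foldl_cons]
    have hbase : max a x ≤ u.foldl max (max a x) := ih (max a x) _ List.mem_cons_self
    rcases List.mem_cons.mp hy with rfl | h1
    · exact le_trans (le_max_left y x) hbase
    · rcases List.mem_cons.mp h1 with rfl | h2
      · exact le_trans (le_max_right a y) hbase
      · exact ih (max a x) y (List.mem_cons_of_mem _ h2)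

lemma pairwise_le_getLast (x : Int) (u : List Int) (hp : (x :: u).Pairwise (· ≤ ·)) :
    ∀ y ∈ x :: u, y ≤ (x :: u).getLast (by simp) := by
  induction u generalizing x with
  | nil => intro y hy; simp at hy; subst hy; simp
  | cons z v ih =>
    intro y hy
    rw [List.getLast_cons (by simp)]
    rcases List.mem_cons.mp hy with h1 | h1
    · have hx : x ≤ z := (List.pairwise_cons.mp hp).1 z List.mem_cons_self
      exact h1 ▸ le_trans hx (ih z (List.pairwise_cons.mp hp).2 z List.mem_cons_self)
    · exact ih z (List.pairwise_cons.mp hp).2 y h1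

-- ===== VERDICT =====
theorem checksum_row_spec : Claim_equal_checksum_row := by
  intro row _
  unfold Spec_checksum_row checksum_row checksum_row_alt
  cases row with
  | nil => rfl
  | cons h t =>
    simp only [pair_fold_minmax, List.foldl_cons, gt_iff_lt, lt_self_iff_false, if_false]
    rcases hmu : PySem.List.sorted (h :: t) (fun y => y) false with _ | ⟨m, u⟩
    · exfalso
      have hl := PySem.List.length_sorted (xs := h :: t) (key := fun y => y) (rev := false)
      rw [hmu] at hl; simp at hl
    · have hperm : ∀ x, x ∈ m :: u ↔ x ∈ h :: t := by
        intro x; rw [← hmu]; exact PySem.List.mem_sorted ..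
      have hpw : (m :: u).Pairwise (· ≤ ·) := by
        rw [← hmu]
        exact PySem.List.sorted_pairwise (xs := h :: t) (key := fun y => y)
      rw [if_neg (by simp : ¬ (m :: u : List Int).length = 0)]
      rw [PySem.List.pyGetD_neg_one (h := by simp), PySem.List.pyGetD_zero]
      have hmin : t.foldl min h = m := by
        apply le_antisymm
        · exact foldl_min_le t h m ((hperm m).mp List.mem_cons_self)
        · exact PySem.List.key_head_sorted_le _ _ hmu _ (foldl_min_mem t h)
      have hmax : t.foldl max h = (m :: u).getLast (by simp) := by
        apply le_antisymm
        · exact pairwise_le_getLast m u hpw _ ((hperm _).mpr (foldl_max_mem t h))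
        · exact le_foldl_max' t h _ ((hperm _).mp (List.getLast_mem (by simp)))
      rw [hmin, hmax]
      simp [List.getD]
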